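-- pv_equiv track=rewrite | github.com/TresNiveles2026-boop/API-Power-Bi | app/ai/graph.py | _parse_column_types_from_semantic_context
-- ===== SOURCE A (Python) =====
-- def _parse_column_types_from_semantic_context(semantic_context: str) -> dict[str, dict[str, str]]:
--     """
--     Extrae tipos de columnas desde el markdown del diccionario semántico.
--     Retorna: {table: {column: type}}
--     """
--     table_types: dict[str, dict[str, str]] = {}
--     current_table: str | None = None
--     for raw in semantic_context.splitlines():
--         line = raw.strip()
--         if line.startswith("## Tabla:"):
--             current_table = line.replace("## Tabla:", "", 1).strip()
--             table_types.setdefault(current_table, {})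
--             continue
--         if not current_table or not line.startswith("|"):
--             continue
--         if line.startswith("| Columna ") or line.startswith("|---------"):
--             continue
--         parts = [p.strip() for p in line.strip("|").split("|")]
--         if len(parts) < 2:
--             continue
--         column_name = parts[0]
--         data_type = parts[1]
--         if column_name and data_type:
--             table_types[current_table][column_name] = data_type
--     return table_types
-- ===== SOURCE B (Python) =====
-- def _parse_column_types_from_semantic_context(semantic_context: str) -> dict[str, dict[str, str]]:
--     """Two-pass rewrite: segment the markdown into per-table sections first,
--     then parse each section's rows into a column->type dict."""
--     # Pass 1: group body lines under the table header that precedes them.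
--     sections: dict[str, list[str]] = {}
--     current: list[str] | None = None
--     for raw in semantic_context.splitlines():
--         line = raw.strip()
--         if line.startswith("## Tabla:"):
--             name = line.replace("## Tabla:", "", 1).strip()
--             rows = sections.setdefault(name, [])
--             # an empty table name registers an (empty) table but opens no section
--             current = rows if name else None
--         elif current is not None:
--             current.append(line)
--     # Pass 2: parse each section's rows.
--     result: dict[str, dict[str, str]] = {}
--     for name, body in sections.items():
--         cols: dict[str, str] = {}
--         for line in body:
--             if (not line.startswith("|") or line.startswith("| Columna ")
--                     or line.startswith("|---------")):
--                 continue
--             parts = [p.strip() for p in line.strip("|").split("|")]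
--             if len(parts) >= 2 and parts[0] and parts[1]:
--                 cols[parts[0]] = parts[1]
--         result[name] = cols
--     return result
-- ===== Notes on version B (the rewrite author's own statement) =====
-- stated objective: alternative
-- what changed: Replaces A's single stateful pass (a current-table cursor updating a nested dict row by row) with a two-pass decomposition: first segment the markdown into per-table sections (merging repeated headers, empty dict for bare headers), then parse each section's rows into its column-type dict.
import Mathlib
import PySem

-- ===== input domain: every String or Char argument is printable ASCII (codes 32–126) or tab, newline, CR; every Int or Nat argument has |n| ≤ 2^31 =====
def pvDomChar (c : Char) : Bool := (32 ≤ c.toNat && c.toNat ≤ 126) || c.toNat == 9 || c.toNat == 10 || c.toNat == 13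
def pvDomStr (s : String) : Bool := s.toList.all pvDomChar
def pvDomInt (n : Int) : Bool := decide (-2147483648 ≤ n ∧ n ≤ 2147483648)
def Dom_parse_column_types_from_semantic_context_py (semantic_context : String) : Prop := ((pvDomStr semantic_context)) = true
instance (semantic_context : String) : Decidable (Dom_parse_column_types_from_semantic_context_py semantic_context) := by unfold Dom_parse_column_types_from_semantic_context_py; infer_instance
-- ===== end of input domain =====

-- B re-decomposes A's single stateful pass into two passes (segment into per-table
-- sections, then parse each section's rows); same cost, objective: alternative decomposition.

-- ===== shared low-level helpers (both Pythons contain these very lines) =====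

-- dict.setdefault d k v on an association list: unchanged if k present, else append (k, v)
def pvSetdefault {β : Type} (d : List (String × β)) (k : String) (v : β) : List (String × β) :=
  if d.any (fun p => p.1 == k) then d else d ++ [(k, v)]

-- d[k] = f(d[k]) on an association list; exact for the reachable states of both
-- programs, where k is always present (setdefault always precedes any modification)
def pvModify {β : Type} (d : List (String × β)) (k : String) (f : β → β) : List (String × β) :=
  d.map (fun p => if p.1 == k then (p.1, f p.2) else p)

-- cols[c] = v : overwrite in place if present, else append (Python dict assignment)
def pvDictInsert (d : List (String × String)) (k v : String) : List (String × String) :=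
  if d.any (fun p => p.1 == k) then d.map (fun p => if p.1 == k then (k, v) else p)
  else d ++ [(k, v)]

-- s.replace(old, new, 1) for nonempty old: splice at the first occurrence (exact there)
def pvReplaceFirst (s old new : String) : String :=
  let i := PySem.Str.find s old
  if i < 0 then s
  else String.ofList (s.toList.take i.toNat ++ new.toList ++ s.toList.drop (i.toNat + old.toList.length))

-- the row-parsing conditions both Pythons contain verbatim: returns (column, type) if
-- the line is a data row.  split? with the literal nonempty separator "|" is always some.
def pvRowParse (line : String) : Option (String × String) :=
  if ¬ PySem.Str.startswith line "|" then none
  else if PySem.Str.startswith line "| Columna " then none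
  else if PySem.Str.startswith line "|---------" then none
  else
    let parts := ((PySem.Str.split? (PySem.Str.stripChars line "|") "|").getD []).map PySem.Str.strip
    match parts with
    | c :: t :: _ => if c ≠ "" ∧ t ≠ "" then some (c, t) else none
    | _ => none

-- ===== PORT A =====
-- one pass: state = (table_types as assoc list of assoc lists, current_table)
def pvStepA (st : List (String × List (String × String)) × Option String) (raw : String) :
    List (String × List (String × String)) × Option String :=
  let line := PySem.Str.strip raw
  if PySem.Str.startswith line "## Tabla:" then
    let t := PySem.Str.strip (pvReplaceFirst line "## Tabla:" "")
    (pvSetdefault st.1 t [], some t)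
  else
    match st.2 with
    | none => st
    | some t =>
      if t = "" then st  -- 'not current_table' is also true for the empty string
      else
        match pvRowParse line with
        | none => st
        | some cv => (pvModify st.1 t (fun cols => pvDictInsert cols cv.1 cv.2), st.2)

def parse_column_types_from_semantic_context_py (semantic_context : String) :
    List (String × List (String × String)) :=
  ((PySem.Str.splitlines semantic_context).foldl pvStepA ([], none)).1

-- ===== PORT B =====
-- pass 1 step: state = (sections as assoc list of line lists, current section name;
-- none models Source B's 'current = None', including for an empty table name)
def pvStepB (st : List (String × List String) × Option String) (raw : String) :
    List (String × List String) × Option String :=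
  let line := PySem.Str.strip raw
  if PySem.Str.startswith line "## Tabla:" then
    let name := PySem.Str.strip (pvReplaceFirst line "## Tabla:" "")
    (pvSetdefault st.1 name [], if name = "" then none else some name)
  else
    match st.2 with
    | none => st
    | some t => (pvModify st.1 t (fun b => b ++ [line]), st.2)

-- pass 2 inner loop body: fold a row into the cols dict
def pvRowStep (cols : List (String × String)) (line : String) : List (String × String) :=
  match pvRowParse line with
  | none => cols
  | some cv => pvDictInsert cols cv.1 cv.2

def pvParseBody (body : List String) : List (String × String) :=
  body.foldl pvRowStep []

-- pass 2: section keys are unique, so 'result[name] = cols' always appends → a map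
def pvConv (S : List (String × List String)) : List (String × List (String × String)) :=
  S.map (fun p => (p.1, pvParseBody p.2))

def parse_column_types_from_semantic_context_py_alt (semantic_context : String) :
    List (String × List (String × String)) :=
  pvConv ((PySem.Str.splitlines semantic_context).foldl pvStepB ([], none)).1

-- ===== PRECONDITION & SPEC =====
def Spec_parse_column_types_from_semantic_context_py (semantic_context : String) (out : List (String × List (String × String))) : Prop := out = parse_column_types_from_semantic_context_py_alt semantic_context
instance (semantic_context : String) (out : List (String × List (String × String))) : Decidable (Spec_parse_column_types_from_semantic_context_py semantic_context out) := by unfold Spec_parse_column_types_from_semantic_context_py; infer_instance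

-- ===== CLAIM (what is proved, stated in full; the proofs are below) =====
def Claim_equal_parse_column_types_from_semantic_context_py : Prop := ∀ (semantic_context : String), Dom_parse_column_types_from_semantic_context_py semantic_context → Spec_parse_column_types_from_semantic_context_py semantic_context (parse_column_types_from_semantic_context_py semantic_context)

-- ===== LEMMAS AND PROOFS =====

-- A's current_table "seen through the rows": none and "" behave identically
def pvEff : Option String → Option String
  | none => none
  | some t => if t = "" then none else some t

theorem pvParseBody_snoc (b : List String) (l : String) :
    pvParseBody (b ++ [l]) = pvRowStep (pvParseBody b) l := by
  simp [pvParseBody, List.foldl_append]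

theorem pvConv_setdefault (S : List (String × List String)) (t : String) :
    pvConv (pvSetdefault S t []) = pvSetdefault (pvConv S) t ([] : List (String × String)) := by
  have hany : ((pvConv S).any fun p => p.1 == t) = (S.any fun p => p.1 == t) := by
    simp [pvConv, List.any_map, Function.comp_def]
  unfold pvSetdefault
  rw [hany]
  split_ifs with h
  · rfl
  · simp [pvConv, pvParseBody]

theorem pvConv_modify (S : List (String × List String)) (t line : String) :
    pvConv (pvModify S t (fun b => b ++ [line]))
      = pvModify (pvConv S) t (fun cols => pvRowStep cols line) := by
  induction S with
  | nil => rfl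
  | cons p rest ih =>
    obtain ⟨k, b⟩ := p
    have ih' : List.map (fun p => (p.1, pvParseBody p.2))
          (List.map (fun p => if (p.1 == t) = true then (p.1, p.2 ++ [line]) else p) rest)
        = List.map (fun q => if (q.1 == t) = true then (q.1, pvRowStep q.2 line) else q)
          (List.map (fun p => (p.1, pvParseBody p.2)) rest) := by
      simpa [pvConv, pvModify] using ih
    simp only [pvConv, pvModify, List.map_cons]
    rw [ih']
    by_cases h : k == t <;> simp [h, pvParseBody_snoc]

theorem pvModify_id {β : Type} (d : List (String × β)) (t : String) :
    pvModify d t (fun b => b) = d := by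
  induction d with
  | nil => rfl
  | cons p rest ih =>
    simp only [pvModify, List.map_cons] at *
    by_cases h : p.1 == t <;> simp [h, ih]

theorem pvStep_pres (raw : String) (SB : List (String × List String)) (curA : Option String) :
    pvStepA (pvConv SB, curA) raw
      = (pvConv (pvStepB (SB, pvEff curA) raw).1,
         (pvStepA (pvConv SB, curA) raw).2) ∧
    pvEff (pvStepA (pvConv SB, curA) raw).2 = (pvStepB (SB, pvEff curA) raw).2 := by
  unfold pvStepA pvStepB
  by_cases hh : PySem.Str.startswith (PySem.Str.strip raw) "## Tabla:"
  · simp only [hh, if_true]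
    refine ⟨by simp [pvConv_setdefault], ?_⟩
    simp [pvEff]
  · simp only [hh]
    cases curA with
    | none => simp [pvEff]
    | some t =>
      by_cases ht : t = ""
      · simp [pvEff, ht]
      · simp only [pvEff, ht]
        cases hr : pvRowParse (PySem.Str.strip raw) with
        | none =>
          constructor
          · simp [pvConv_modify, pvRowStep, hr, pvModify_id]
          · simp [ht]
        | some cv =>
          constructor
          · simp [pvConv_modify, pvRowStep, hr]
          · simp [ht]

theorem pvFold_pres (ls : List String) :
    ∀ (SB : List (String × List String)) (curA : Option String),
      ls.foldl pvStepA (pvConv SB, curA)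
        = (pvConv (ls.foldl pvStepB (SB, pvEff curA)).1,
           (ls.foldl pvStepA (pvConv SB, curA)).2) ∧
      pvEff (ls.foldl pvStepA (pvConv SB, curA)).2
        = (ls.foldl pvStepB (SB, pvEff curA)).2 := by
  induction ls with
  | nil => intro SB curA; exact ⟨rfl, rfl⟩
  | cons raw rest ih =>
    intro SB curA
    have hs := pvStep_pres raw SB curA
    simp only [List.foldl_cons]
    have h1 : pvStepA (pvConv SB, curA) raw
        = (pvConv (pvStepB (SB, pvEff curA) raw).1, (pvStepA (pvConv SB, curA) raw).2) := hs.1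
    have h2 := hs.2
    rw [h1]
    have := ih (pvStepB (SB, pvEff curA) raw).1 (pvStepA (pvConv SB, curA) raw).2
    rw [h2] at this
    simpa using this

-- ===== VERDICT (by name: the statement is the Claim_ definition above) =====
theorem parse_column_types_from_semantic_context_py_spec : Claim_equal_parse_column_types_from_semantic_context_py := by
  intro s _
  unfold Spec_parse_column_types_from_semantic_context_py
  unfold parse_column_types_from_semantic_context_py parse_column_types_from_semantic_context_py_alt
  have h := pvFold_pres (PySem.Str.splitlines s) [] none
  have : pvConv ([] : List (String × List String)) = [] := rfl
  rw [show pvEff none = none from rfl] at h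
  rw [← this, h.1]
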